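-- pv_equiv track=rewrite | github.com/yugotakada/FWO-color-code | src/FWO_color_code_488_cond_error.py | reorder_list_len4_elements_z_meas
-- ===== SOURCE A (Python) =====
-- def reorder_list_len4_elements_z_meas(input_list):
--     output = []
--     for i in range(0, len(input_list), 4):
--         chunk = input_list[i:i + 4]
--         if len(chunk) == 4:
--             reordered_chunk = [chunk[0], chunk[1], chunk[3], chunk[2]]
--             output.extend(reordered_chunk)
--
--     return output
-- ===== SOURCE B (Python) =====
-- def reorder_list_len4_elements_z_meas(input_list):
--     n = len(input_list) - len(input_list) % 4
--     output = input_list[:n]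
--     for i in range(2, n, 4):
--         output[i], output[i + 1] = output[i + 1], output[i]
--     return output
-- ===== Notes on version B (the rewrite author's own statement) =====
-- stated objective: faster
-- what changed: Instead of slicing out each 4-chunk and rebuilding it, B truncates the list to a multiple of 4 with one slice copy and then swaps the adjacent pair at positions i, i+1 for i = 2, 6, 10, ... in place.
import Mathlib
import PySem

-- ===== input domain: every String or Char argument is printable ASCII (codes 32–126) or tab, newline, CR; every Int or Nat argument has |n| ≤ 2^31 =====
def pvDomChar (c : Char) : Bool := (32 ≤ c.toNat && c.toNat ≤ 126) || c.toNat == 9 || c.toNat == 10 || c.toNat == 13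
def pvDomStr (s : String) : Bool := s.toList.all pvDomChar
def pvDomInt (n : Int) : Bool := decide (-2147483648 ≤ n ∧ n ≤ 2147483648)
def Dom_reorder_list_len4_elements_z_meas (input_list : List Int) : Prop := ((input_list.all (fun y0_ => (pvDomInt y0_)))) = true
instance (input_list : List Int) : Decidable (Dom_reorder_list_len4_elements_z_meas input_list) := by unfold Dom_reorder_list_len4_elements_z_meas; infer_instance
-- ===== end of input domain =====

-- B truncates the input to a multiple of 4 with one slice copy and swaps the pair at
-- positions i, i+1 for i = 2, 6, 10, ... in place, instead of rebuilding each 4-chunk.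


-- ===== PORT A =====
-- Literal port of A: for i in range(0, len, 4): chunk = input_list[i:i+4];
-- if len(chunk) == 4: output.extend([chunk[0], chunk[1], chunk[3], chunk[2]]).
-- chunk[k] is ported as pyGetD chunk k 0; the indices are in range whenever the branch fires, so this is exact.
def reorder_list_len4_elements_z_meas (input_list : List Int) : List Int :=
  (PySem.List.pyRange 0 (input_list.length : Int) 4).foldl
    (fun output i =>
      let chunk := PySem.List.slice input_list (some i) (some (i + 4))
      if chunk.length = 4 then
        output ++ [PySem.List.pyGetD chunk 0 0, PySem.List.pyGetD chunk 1 0,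
                   PySem.List.pyGetD chunk 3 0, PySem.List.pyGetD chunk 2 0]
      else output)
    []

-- ===== PORT B =====
-- Loop body of B: output[i], output[i+1] = output[i+1], output[i]  (RHS pair read first, then assigned).
-- Indices are always in range here, so pyGetD/pySetD are exact.
def pvSwapStep (out : List Int) (i : Int) : List Int :=
  let x := PySem.List.pyGetD out (i + 1) 0
  let y := PySem.List.pyGetD out i 0
  PySem.List.pySetD (PySem.List.pySetD out i x) (i + 1) y

def reorder_list_len4_elements_z_meas_alt (input_list : List Int) : List Int :=
  let n : Int := (input_list.length : Int) - PySem.Int.mod (input_list.length : Int) 4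
  let output := PySem.List.slice input_list none (some n)
  (PySem.List.pyRange 2 n 4).foldl pvSwapStep output

-- ===== PRECONDITION & SPEC =====
def Spec_reorder_list_len4_elements_z_meas (input_list : List Int) (out : List Int) : Prop := out = reorder_list_len4_elements_z_meas_alt input_list
instance (input_list : List Int) (out : List Int) : Decidable (Spec_reorder_list_len4_elements_z_meas input_list out) := by unfold Spec_reorder_list_len4_elements_z_meas; infer_instance

-- ===== CLAIM (what is proved, stated in full; the proofs are below) =====
def Claim_equal_reorder_list_len4_elements_z_meas : Prop := ∀ (input_list : List Int), Dom_reorder_list_len4_elements_z_meas input_list → Spec_reorder_list_len4_elements_z_meas input_list (reorder_list_len4_elements_z_meas input_list)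

-- ===== LEMMAS AND PROOFS =====

-- Reference function: swap the last two of every complete 4-chunk, drop the rest.
def pvChunkSwap : List Int → List Int
  | a :: b :: c :: d :: t => a :: b :: d :: c :: pvChunkSwap t
  | _ => []

theorem pvRange4_nil (a b : Int) (h : b ≤ a) : PySem.List.pyRange a b 4 = [] := by
  rw [PySem.List.pyRange_of_pos a b (by norm_num)]
  simp [show ¬ a < b by omega]

theorem pvRange4_cons (a b : Int) (h : a < b) :
    PySem.List.pyRange a b 4 = a :: PySem.List.pyRange (a + 4) b 4 := by
  rw [PySem.List.pyRange_of_pos a b (by norm_num),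
      PySem.List.pyRange_of_pos (a + 4) b (by norm_num)]
  by_cases h4 : a + 4 < b
  · have hc : ((b - a + 4 - 1) / 4).toNat = ((b - (a + 4) + 4 - 1) / 4).toNat + 1 := by omega
    simp only [if_pos h, if_pos h4, hc, List.range_succ_eq_map, List.map_cons, List.map_map]
    congr 1
    · norm_num
    · apply List.map_congr_left
      intro k _
      simp [Function.comp]
      ring
  · have hc : ((b - a + 4 - 1) / 4).toNat = 1 := by omega
    simp [if_pos h, if_neg h4, hc, List.range_succ]

theorem pvRange4_shift (a b c : Int) :
    PySem.List.pyRange (a + c) (b + c) 4 = (PySem.List.pyRange a b 4).map (· + c) := by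
  rw [PySem.List.pyRange_of_pos a b (by norm_num),
      PySem.List.pyRange_of_pos (a + c) (b + c) (by norm_num)]
  have hd : b + c - (a + c) + 4 - 1 = b - a + 4 - 1 := by ring
  by_cases hab : a < b
  · simp only [if_pos hab, if_pos (show a + c < b + c by omega), hd, List.map_map]
    apply List.map_congr_left
    intro k _
    simp [Function.comp]
    ring
  · simp [if_neg hab]

theorem pvFlatMap_congr {f g : Int → List Int} (l : List Int) (h : ∀ x ∈ l, f x = g x) :
    l.flatMap f = l.flatMap g := by
  induction l with
  | nil => rfl
  | cons x xs ih =>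
    simp only [List.flatMap_cons]
    rw [h x (by simp), ih (fun y hy => h y (by simp [hy]))]

-- A's body written as an append of a computed block.
def pvABlock (l : List Int) (i : Int) : List Int :=
  let chunk := PySem.List.slice l (some i) (some (i + 4))
  if chunk.length = 4 then
    [PySem.List.pyGetD chunk 0 0, PySem.List.pyGetD chunk 1 0,
     PySem.List.pyGetD chunk 3 0, PySem.List.pyGetD chunk 2 0]
  else []

theorem pvA_flatMap (l : List Int) :
    reorder_list_len4_elements_z_meas l =
      (PySem.List.pyRange 0 (l.length : Int) 4).flatMap (pvABlock l) := by
  unfold reorder_list_len4_elements_z_meas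
  have hbody : (fun (output : List Int) (i : Int) =>
      let chunk := PySem.List.slice l (some i) (some (i + 4))
      if chunk.length = 4 then
        output ++ [PySem.List.pyGetD chunk 0 0, PySem.List.pyGetD chunk 1 0,
                   PySem.List.pyGetD chunk 3 0, PySem.List.pyGetD chunk 2 0]
      else output) = fun output i => output ++ pvABlock l i := by
    funext output i
    simp only [pvABlock]
    split_ifs <;> simp
  rw [hbody, PySem.List.foldl_append_eq_flatMap]
  simp

theorem pvSlice_cons4_shift (a b c d : Int) (t : List Int) (i : Int) (hi : 0 ≤ i) :
    PySem.List.slice (a :: b :: c :: d :: t) (some (i + 4)) (some (i + 8)) =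
      PySem.List.slice t (some i) (some (i + 4)) := by
  rw [PySem.List.slice_toNat (a :: b :: c :: d :: t) (by omega) (by omega),
      PySem.List.slice_toNat t hi (by omega)]
  have h4 : (i + 4).toNat = i.toNat + 4 := by omega
  have h8 : (i + 8).toNat = i.toNat + 8 := by omega
  rw [h4, h8]
  have hdrop : List.drop (i.toNat + 4) (a :: b :: c :: d :: t) = List.drop i.toNat t := by
    simp [List.drop_succ_cons, show i.toNat + 4 = ((i.toNat + 3) + 1) by omega,
          show i.toNat + 3 = ((i.toNat + 2) + 1) by omega,
          show i.toNat + 2 = ((i.toNat + 1) + 1) by omega]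
  rw [hdrop]
  congr 1
  omega

theorem pvABlock_shift4 (a b c d : Int) (t : List Int) (i : Int) (hi : 0 ≤ i) :
    pvABlock (a :: b :: c :: d :: t) (i + 4) = pvABlock t i := by
  unfold pvABlock
  have e : (i + 4 + 4 : Int) = i + 8 := by ring
  rw [e, pvSlice_cons4_shift a b c d t i hi]

theorem pvABlock_zero (a b c d : Int) (t : List Int) :
    pvABlock (a :: b :: c :: d :: t) 0 = [a, b, d, c] := by
  have hch : PySem.List.slice (a :: b :: c :: d :: t) (some 0) (some (0 + 4)) = [a, b, c, d] := by
    rw [PySem.List.slice_toNat _ (by norm_num) (by norm_num)]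
    norm_num [show Int.toNat 4 = 4 from rfl, List.take_succ_cons]
  unfold pvABlock
  rw [hch]
  norm_num [PySem.List.pyGetD, PySem.List.pyGet?, PySem.List.pyIdx?,
            show Int.toNat 3 = 3 from rfl, show Int.toNat 2 = 2 from rfl]

theorem pvA_eq_chunkSwap (l : List Int) :
    reorder_list_len4_elements_z_meas l = pvChunkSwap l := by
  induction l using pvChunkSwap.induct with
  | case1 a b c d t ih =>
    rw [pvA_flatMap]
    have hlen : ((a :: b :: c :: d :: t).length : Int) = (t.length : Int) + 4 := by
      simp; omega
    rw [hlen, pvRange4_cons 0 _ (by omega)]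
    have hshift : PySem.List.pyRange (0 + 4) ((t.length : Int) + 4) 4 =
        (PySem.List.pyRange 0 (t.length : Int) 4).map (· + 4) := by
      have := pvRange4_shift 0 (t.length : Int) 4
      simpa using this
    rw [List.flatMap_cons, hshift, List.flatMap_map, pvABlock_zero]
    have hcong : (PySem.List.pyRange 0 (t.length : Int) 4).flatMap
        (fun i => pvABlock (a :: b :: c :: d :: t) (i + 4)) =
        (PySem.List.pyRange 0 (t.length : Int) 4).flatMap (pvABlock t) := by
      apply pvFlatMap_congr
      intro i hi
      have h0 : 0 ≤ i := by
        have := (PySem.List.mem_pyRange_iff_of_pos (by norm_num : (0:Int) < 4) i).mp hi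
        omega
      simpa [Function.comp] using pvABlock_shift4 a b c d t i h0
    rw [hcong, ← pvA_flatMap, ih]
    simp [pvChunkSwap]
  | case2 l hshape =>
    rw [pvA_flatMap]
    have hsmall : l.length < 4 := by
      rcases l with _ | ⟨a, _ | ⟨b, _ | ⟨c, _ | ⟨d, t⟩⟩⟩⟩
      · simp
      · simp
      · simp
      · simp
      · exact ((hshape a b c d t rfl).elim)
    have hcs : pvChunkSwap l = [] := by
      rcases l with _ | ⟨a, _ | ⟨b, _ | ⟨c, _ | ⟨d, t⟩⟩⟩⟩
      · rfl
      · rfl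
      · rfl
      · rfl
      · exact ((hshape a b c d t rfl).elim)
    rw [hcs]
    rcases Nat.eq_zero_or_pos l.length with h0 | hpos
    · rw [h0]
      simp [pvRange4_nil 0 0 le_rfl]
    · rw [pvRange4_cons 0 _ (by exact_mod_cast hpos),
          pvRange4_nil (0 + 4) _ (by push_cast; omega)]
      simp only [List.flatMap_cons, List.flatMap_nil, List.append_nil]
      unfold pvABlock
      have hlen : (PySem.List.slice l (some 0) (some (0 + 4))).length = l.length := by
        rw [PySem.List.slice_toNat _ (by norm_num) (by norm_num)]
        norm_num [show Int.toNat 4 = 4 from rfl]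
        omega
      simp only [hlen]
      rw [if_neg (by omega)]

-- pyGetD / pySetD step over one cons cell, for a nonnegative index.
theorem pvGetD_cons (x : Int) (xs : List Int) (i : Int) (hi : 0 ≤ i) (d : Int) :
    PySem.List.pyGetD (x :: xs) (i + 1) d = PySem.List.pyGetD xs i d := by
  obtain ⟨n, rfl⟩ := Int.eq_ofNat_of_zero_le hi
  rw [PySem.List.pyGetD, PySem.List.pyGetD, PySem.List.pyGet?_cons_succ]

theorem pvSetD_cons (x : Int) (xs : List Int) (i : Int) (hi : 0 ≤ i) (v : Int) :
    PySem.List.pySetD (x :: xs) (i + 1) v = x :: PySem.List.pySetD xs i v := by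
  obtain ⟨n, rfl⟩ := Int.eq_ofNat_of_zero_le hi
  simp only [PySem.List.pySetD, PySem.List.pySet?, PySem.List.pyIdx?, List.length_cons]
  by_cases h : (n : Int) < (xs.length : Int)
  · rw [if_pos (show (0:Int) ≤ (n : Int) + 1 by omega), if_pos (by push_cast; omega),
        if_pos hi, if_pos h]
    simp [(show ((n : Int) + 1).toNat = n + 1 by omega), (show ((n : Int)).toNat = n by omega),
          List.set_cons_succ]
  · rw [if_pos (show (0:Int) ≤ (n : Int) + 1 by omega), if_neg (by push_cast; omega),
        if_pos hi, if_neg h]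
    simp

theorem pvSwapStep_def (out : List Int) (i : Int) :
    pvSwapStep out i =
      PySem.List.pySetD (PySem.List.pySetD out i (PySem.List.pyGetD out (i + 1) 0)) (i + 1)
        (PySem.List.pyGetD out i 0) := rfl

theorem pvSwapStep_cons (x : Int) (r : List Int) (i : Int) (hi : 0 ≤ i) :
    pvSwapStep (x :: r) (i + 1) = x :: pvSwapStep r i := by
  rw [pvSwapStep_def, pvSwapStep_def,
      pvGetD_cons x r (i + 1) (by omega), pvGetD_cons x r i hi,
      pvSetD_cons x r i hi, pvSetD_cons _ _ (i + 1) (by omega)]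

theorem pvSwapStep_cons4 (p q s u : Int) (r : List Int) (i : Int) (hi : 0 ≤ i) :
    pvSwapStep (p :: q :: s :: u :: r) (i + 4) = p :: q :: s :: u :: pvSwapStep r i := by
  have e1 : (i + 4 : Int) = (i + 3) + 1 := by ring
  rw [e1, pvSwapStep_cons p _ (i + 3) (by omega)]
  have e2 : (i + 3 : Int) = (i + 2) + 1 := by ring
  rw [e2, pvSwapStep_cons q _ (i + 2) (by omega)]
  have e3 : (i + 2 : Int) = (i + 1) + 1 := by ring
  rw [e3, pvSwapStep_cons s _ (i + 1) (by omega)]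
  rw [pvSwapStep_cons u r i hi]

theorem pvSetD_zero_cons (x : Int) (xs : List Int) (v : Int) :
    PySem.List.pySetD (x :: xs) 0 v = v :: xs := by
  simp only [PySem.List.pySetD, PySem.List.pySet?, PySem.List.pyIdx?, List.length_cons]
  rw [if_pos le_rfl, if_pos (by push_cast; omega)]
  simp

theorem pvSwapStep_zero (c d : Int) (r : List Int) :
    pvSwapStep (c :: d :: r) 0 = d :: c :: r := by
  rw [pvSwapStep_def, pvGetD_cons c (d :: r) 0 le_rfl, PySem.List.pyGetD_zero_cons,
      PySem.List.pyGetD_zero_cons, pvSetD_zero_cons, pvSetD_cons d (d :: r) 0 le_rfl, pvSetD_zero_cons]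

theorem pvSwapStep_two (a b c d : Int) (r : List Int) :
    pvSwapStep (a :: b :: c :: d :: r) 2 = a :: b :: d :: c :: r := by
  rw [show (2 : Int) = 1 + 1 by norm_num, pvSwapStep_cons a _ 1 (by norm_num),
      show (1 : Int) = 0 + 1 by norm_num, pvSwapStep_cons b _ 0 le_rfl, pvSwapStep_zero]

theorem pvFold_shift4 (is : List Int) (h : ∀ i ∈ is, 0 ≤ i) (p q s u : Int) (r : List Int) :
    (is.map (· + 4)).foldl pvSwapStep (p :: q :: s :: u :: r) =
      p :: q :: s :: u :: is.foldl pvSwapStep r := by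
  induction is generalizing r with
  | nil => simp
  | cons i is ih =>
    simp only [List.map_cons, List.foldl_cons]
    rw [pvSwapStep_cons4 p q s u r i (h i (by simp)), ih (fun j hj => h j (by simp [hj]))]

theorem pvMod4 (x : Int) : PySem.Int.mod x 4 = x % 4 := by
  simp only [PySem.Int.mod]
  rw [Int.fmod_eq_emod, if_pos (Or.inl (by norm_num : (0:Int) ≤ 4)), add_zero]

theorem pvAlt_def (l : List Int) :
    reorder_list_len4_elements_z_meas_alt l =
      (PySem.List.pyRange 2 ((l.length : Int) - PySem.Int.mod (l.length : Int) 4) 4).foldl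
        pvSwapStep
        (PySem.List.slice l none
          (some ((l.length : Int) - PySem.Int.mod (l.length : Int) 4))) := rfl

theorem pvB_eq_chunkSwap (l : List Int) :
    reorder_list_len4_elements_z_meas_alt l = pvChunkSwap l := by
  induction l using pvChunkSwap.induct with
  | case1 a b c d t ih =>
    have hlen : (((a :: b :: c :: d :: t).length : Int)) = (t.length : Int) + 4 := by
      push_cast [List.length_cons]
      ring
    rw [pvAlt_def, hlen, pvMod4]
    have hn : ((t.length : Int) + 4) - ((t.length : Int) + 4) % 4 =
        ((t.length : Int) - (t.length : Int) % 4) + 4 := by omega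
    rw [hn]
    have hm0 : (0 : Int) ≤ (t.length : Int) := by positivity
    have hn'0 : (0 : Int) ≤ (t.length : Int) - (t.length : Int) % 4 := by omega
    have hslice : PySem.List.slice (a :: b :: c :: d :: t) none
        (some (((t.length : Int) - (t.length : Int) % 4) + 4)) =
        a :: b :: c :: d ::
          PySem.List.slice t none (some ((t.length : Int) - (t.length : Int) % 4)) := by
      rw [PySem.List.slice_to _ (by omega), PySem.List.slice_to _ hn'0]
      rw [show (((t.length : Int) - (t.length : Int) % 4) + 4).toNat =
            ((t.length : Int) - (t.length : Int) % 4).toNat + 4 by omega]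
      simp [List.take_succ_cons]
    rw [hslice, pvRange4_cons 2 _ (by omega), List.foldl_cons, pvSwapStep_two,
        pvRange4_shift 2 ((t.length : Int) - (t.length : Int) % 4) 4,
        pvFold_shift4 _ (fun i hi => by
          have := (PySem.List.mem_pyRange_iff_of_pos (by norm_num : (0:Int) < 4) i).mp hi
          omega)]
    rw [show pvChunkSwap (a :: b :: c :: d :: t) = a :: b :: d :: c :: pvChunkSwap t from rfl,
        ← ih, pvAlt_def, pvMod4]
  | case2 l hshape =>
    have hsmall : l.length < 4 := by
      rcases l with _ | ⟨a, _ | ⟨b, _ | ⟨c, _ | ⟨d, t⟩⟩⟩⟩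
      · simp
      · simp
      · simp
      · simp
      · exact ((hshape a b c d t rfl).elim)
    have hcs : pvChunkSwap l = [] := by
      rcases l with _ | ⟨a, _ | ⟨b, _ | ⟨c, _ | ⟨d, t⟩⟩⟩⟩
      · rfl
      · rfl
      · rfl
      · rfl
      · exact ((hshape a b c d t rfl).elim)
    rw [pvAlt_def, pvMod4]
    have h0 : (l.length : Int) - (l.length : Int) % 4 = 0 := by omega
    rw [h0, pvRange4_nil 2 0 (by norm_num)]
    simp [PySem.List.slice_to l (le_refl (0 : Int)), hcs]

-- ===== VERDICT (by name: the statement is the Claim_ definition above) =====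
theorem reorder_list_len4_elements_z_meas_spec : Claim_equal_reorder_list_len4_elements_z_meas := by
  intro l _
  unfold Spec_reorder_list_len4_elements_z_meas
  rw [pvA_eq_chunkSwap, pvB_eq_chunkSwap]
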